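-- pv_equiv track=rewrite | github.com/Shrikrishna10/fccmrcc_posit_yolov8 | pythons/gen_golden_mult.py | posit16_decode_hw
-- ===== SOURCE A (Python) =====
-- def posit16_decode_hw(p16):
--     """Decode Posit16 exactly as the Verilog RTL does. Returns (sign, k, exp, frac11)."""
--     p16 = int(p16) & 0xFFFF
--     if p16 == 0x0000:
--         return (0, 0, 0, 0, True, False)   # zero flag
--     if p16 == 0x8000:
--         return (0, 0, 0, 0, False, True)   # NaR flag
--
--     sign = (p16 >> 15) & 1
--     if sign:
--         p16 = ((~p16) + 1) & 0xFFFF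
--
--     body = p16 & 0x7FFF
--     rbit = (body >> 14) & 1
--
--     # Priority encoder: matches Verilog exactly
--     # (body[13] != rbit) ? 1 : (body[12] != rbit) ? 2 : ... : (body[6] != rbit) ? 8 : 9
--     run = 9  # default (all body[13:6] match rbit)
--     for i in range(13, 5, -1):  # 13,12,11,10,9,8,7,6
--         if ((body >> i) & 1) != rbit:
--             run = 13 - i + 1  # body[13]→1, body[12]→2, ..., body[6]→8
--             # Wait, let me match exactly:
--             # (body[13]!=rbit) → run=1
--             # (body[12]!=rbit) → run=2
--             # etc.
--             run = 14 - i
--             break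
--
--     if rbit:
--         k_s = run - 1
--     else:
--         k_s = -run
--
--     # Clamp k to [-3, +3] (REGIME_MAX = 3)
--     k = max(-3, min(3, k_s))
--
--     # Consumed bits = run + 1 (terminator)
--     cons = run + 1
--
--     # Exponent bit at position (14 - cons)
--     exp_pos = 14 - cons
--     if exp_pos >= 0 and exp_pos <= 14:
--         exp_bit = (body >> exp_pos) & 1
--     else:
--         exp_bit = 0
--
--     # Fraction: shift body left by (cons + 1), take top 11 bits
--     shift_amount = cons + 1
--     if shift_amount < 15:
--         fshifted = (body << shift_amount) & 0x7FFF
--         frac = (fshifted >> 4) & 0x7FF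
--     else:
--         frac = 0
--
--     return (sign, k, exp_bit, frac, False, False)
-- ===== SOURCE B (Python) =====
-- def _fields(body):
--     """Regime k, exponent bit and 11-bit fraction of a nonzero 15-bit posit body."""
--     rbit = body >> 14
--     regime8 = (body >> 6) & 0xFF
--     if rbit:
--         regime8 ^= 0xFF
--     run = 9 - regime8.bit_length()          # regime run length, always in 1..9
--     k = min(3, run - 1) if rbit else -min(3, run)
--     exp_bit = (body >> (13 - run)) & 1
--     frac = ((body << (run + 2)) & 0x7FFF) >> 4
--     return k, exp_bit, frac
--
-- def posit16_decode_hw(p16):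
--     """Decode Posit16 into sign/regime/exponent/fraction fields (closed-form regime)."""
--     u = int(p16) & 0xFFFF
--     if u == 0:
--         return (0, 0, 0, 0, True, False)
--     if u == 0x8000:
--         return (0, 0, 0, 0, False, True)
--     sign = u >> 15
--     if sign:
--         u = 0x10000 - u
--     k, e, f = _fields(u & 0x7FFF)
--     return (sign, k, e, f, False, False)
-- ===== Notes on version B (the rewrite author's own statement) =====
-- stated objective: idiomatic
-- what changed: The 8-iteration regime priority-encoder loop is replaced by a closed-form bit_length computation on the (possibly complemented) 8-bit regime field, the field extraction is split into a helper working directly on the 15-bit body, and the always-true range guards and the redundant max/&0x7FF clampings are dropped using the fact that the run length is in 1..9.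
import Mathlib
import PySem

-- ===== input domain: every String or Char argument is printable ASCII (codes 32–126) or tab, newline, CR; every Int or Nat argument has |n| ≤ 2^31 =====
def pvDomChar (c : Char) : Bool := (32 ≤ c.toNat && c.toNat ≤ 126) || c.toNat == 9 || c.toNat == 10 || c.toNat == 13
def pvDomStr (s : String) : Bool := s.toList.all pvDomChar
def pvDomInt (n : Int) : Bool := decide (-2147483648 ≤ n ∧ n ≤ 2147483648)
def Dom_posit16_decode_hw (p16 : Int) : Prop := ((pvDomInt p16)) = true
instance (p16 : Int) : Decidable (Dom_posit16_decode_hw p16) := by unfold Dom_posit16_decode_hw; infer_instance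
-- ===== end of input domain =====

-- B replaces A's 8-step regime priority-encoder loop by a closed-form bit_length computation
-- and, knowing the run length lies in 1..9, drops A's range guards and redundant clampings (idiomatic, same cost).
-- Bitwise ops on nonnegative ints are ported by exact div/mod arithmetic:
--   x & 0xFFFF = x mod 2^16 (for any int), (x >> i) & 1 = x / 2^i % 2,
--   (x << s) & 0x7FFF = x * 2^s mod 2^15, ((~x)+1) & 0xFFFF = (2^16 - x) mod 2^16, m ^ 0xFF = 255 - m for 0 ≤ m < 256 — each exact.

-- ===== PORT A =====
-- the `for i in range(13,5,-1): if ...: run = 14-i; break` loop, with `9` as the fall-through default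
def pvRun (body rbit : Int) : List Int → Int
  | [] => 9
  | i :: rest => if body / (2 ^ i.toNat) % 2 ≠ rbit then 14 - i else pvRun body rbit rest

def posit16_decode_hw (p16 : Int) : Int × Int × Int × Int × Bool × Bool :=
  let p := p16 % 65536                                  -- int(p16) & 0xFFFF
  if p = 0 then (0, 0, 0, 0, true, false)
  else if p = 32768 then (0, 0, 0, 0, false, true)
  else
    let sign := p / 32768 % 2                           -- (p16 >> 15) & 1
    let p := if sign ≠ 0 then (65536 - p) % 65536 else p  -- ((~p16)+1) & 0xFFFF
    let body := p % 32768                               -- p16 & 0x7FFF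
    let rbit := body / 16384 % 2                        -- (body >> 14) & 1
    let run := pvRun body rbit [13, 12, 11, 10, 9, 8, 7, 6]
    let k_s := if rbit ≠ 0 then run - 1 else -run
    let k := max (-3) (min 3 k_s)
    let cons := run + 1
    let exp_pos := 14 - cons
    let exp_bit := if 0 ≤ exp_pos ∧ exp_pos ≤ 14 then body / (2 ^ exp_pos.toNat) % 2 else 0
    let shift_amount := cons + 1
    let frac := if shift_amount < 15 then body * 2 ^ shift_amount.toNat % 32768 / 16 % 2048 else 0
    (sign, k, exp_bit, frac, false, false)

-- ===== PORT B =====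
def pvFields (body : Int) : Int × Int × Int :=
  let rbit := body / 16384                              -- body >> 14
  let regime8 := body / 64 % 256                        -- (body >> 6) & 0xFF
  let regime8 := if rbit ≠ 0 then 255 - regime8 else regime8   -- regime8 ^= 0xFF
  let run := 9 - Int.ofNat (Nat.size regime8.toNat)     -- 9 - regime8.bit_length()
  let k := if rbit ≠ 0 then min 3 (run - 1) else -(min 3 run)
  let exp_bit := body / (2 ^ ((13 - run).toNat)) % 2    -- (body >> (13 - run)) & 1
  let frac := body * 2 ^ ((run + 2).toNat) % 32768 / 16 -- ((body << (run+2)) & 0x7FFF) >> 4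
  (k, exp_bit, frac)

def posit16_decode_hw_alt (p16 : Int) : Int × Int × Int × Int × Bool × Bool :=
  let u := p16 % 65536                                  -- int(p16) & 0xFFFF
  if u = 0 then (0, 0, 0, 0, true, false)
  else if u = 32768 then (0, 0, 0, 0, false, true)
  else
    let sign := u / 32768                               -- u >> 15 (16-bit value)
    let u := if sign ≠ 0 then 65536 - u else u          -- 0x10000 - u
    let kef := pvFields (u % 32768)
    (sign, kef.1, kef.2.1, kef.2.2, false, false)

-- ===== PRECONDITION & SPEC =====
def Spec_posit16_decode_hw (p16 : Int) (out : Int × Int × Int × Int × Bool × Bool) : Prop := out = posit16_decode_hw_alt p16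
instance (p16 : Int) (out : Int × Int × Int × Int × Bool × Bool) : Decidable (Spec_posit16_decode_hw p16 out) := by unfold Spec_posit16_decode_hw; infer_instance

-- ===== CLAIM (what is proved, stated in full; the proofs are below) =====
def Claim_equal_posit16_decode_hw : Prop := ∀ (p16 : Int), Dom_posit16_decode_hw p16 → Spec_posit16_decode_hw p16 (posit16_decode_hw p16)

-- ===== LEMMAS AND PROOFS =====

-- A's loop over bits 13..6, re-expressed on the 8-bit field m = body/64 % 256
def pvRunM (m r : Int) : Int :=
  if m / 128 % 2 ≠ r then 1 else if m / 64 % 2 ≠ r then 2 else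
  if m / 32 % 2 ≠ r then 3 else if m / 16 % 2 ≠ r then 4 else
  if m / 8 % 2 ≠ r then 5 else if m / 4 % 2 ≠ r then 6 else
  if m / 2 % 2 ≠ r then 7 else if m % 2 ≠ r then 8 else 9

theorem pvRun_as_m (body r : Int) :
    pvRun body r [13, 12, 11, 10, 9, 8, 7, 6] = pvRunM (body / 64 % 256) r := by
  have e13 : body / 2 ^ ((13:Int).toNat) % 2 = (body / 64 % 256) / 128 % 2 := by
    rw [show (2:Int) ^ ((13:Int).toNat) = 8192 from by decide]; omega
  have e12 : body / 2 ^ ((12:Int).toNat) % 2 = (body / 64 % 256) / 64 % 2 := by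
    rw [show (2:Int) ^ ((12:Int).toNat) = 4096 from by decide]; omega
  have e11 : body / 2 ^ ((11:Int).toNat) % 2 = (body / 64 % 256) / 32 % 2 := by
    rw [show (2:Int) ^ ((11:Int).toNat) = 2048 from by decide]; omega
  have e10 : body / 2 ^ ((10:Int).toNat) % 2 = (body / 64 % 256) / 16 % 2 := by
    rw [show (2:Int) ^ ((10:Int).toNat) = 1024 from by decide]; omega
  have e9 : body / 2 ^ ((9:Int).toNat) % 2 = (body / 64 % 256) / 8 % 2 := by
    rw [show (2:Int) ^ ((9:Int).toNat) = 512 from by decide]; omega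
  have e8 : body / 2 ^ ((8:Int).toNat) % 2 = (body / 64 % 256) / 4 % 2 := by
    rw [show (2:Int) ^ ((8:Int).toNat) = 256 from by decide]; omega
  have e7 : body / 2 ^ ((7:Int).toNat) % 2 = (body / 64 % 256) / 2 % 2 := by
    rw [show (2:Int) ^ ((7:Int).toNat) = 128 from by decide]; omega
  have e6 : body / 2 ^ ((6:Int).toNat) % 2 = (body / 64 % 256) % 2 := by
    rw [show (2:Int) ^ ((6:Int).toNat) = 64 from by decide]; omega
  simp only [pvRun, pvRunM, e13, e12, e11, e10, e9, e8, e7, e6]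
  norm_num

theorem pvSizeChar (n k : Nat) (h1 : 2 ^ k ≤ n) (h2 : n < 2 ^ (k + 1)) : Nat.size n = k + 1 := by
  have a : Nat.size n ≤ k + 1 := Nat.size_le.2 h2
  have b : k < Nat.size n := Nat.lt_size.2 h1
  omega

theorem pvRunM_core (y : Int) (h0 : 0 ≤ y) (h1 : y < 256) :
    pvRunM y 0 = 9 - Int.ofNat (Nat.size y.toNat) := by
  unfold pvRunM
  split_ifs with b1 b2 b3 b4 b5 b6 b7 b8
  · rw [pvSizeChar y.toNat 7 (by omega) (by omega)]; norm_num
  · rw [pvSizeChar y.toNat 6 (by omega) (by omega)]; norm_num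
  · rw [pvSizeChar y.toNat 5 (by omega) (by omega)]; norm_num
  · rw [pvSizeChar y.toNat 4 (by omega) (by omega)]; norm_num
  · rw [pvSizeChar y.toNat 3 (by omega) (by omega)]; norm_num
  · rw [pvSizeChar y.toNat 2 (by omega) (by omega)]; norm_num
  · rw [pvSizeChar y.toNat 1 (by omega) (by omega)]; norm_num
  · rw [pvSizeChar y.toNat 0 (by omega) (by omega)]; norm_num
  · have hy : y.toNat = 0 := by omega
    rw [hy, Nat.size_zero]; norm_num

theorem pvRunM_compl (m : Int) :
    pvRunM m 1 = pvRunM (255 - m) 0 := by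
  have c1 : (m / 128 % 2 = 1) ↔ ((255 - m) / 128 % 2 = 0) := by omega
  have c2 : (m / 64 % 2 = 1) ↔ ((255 - m) / 64 % 2 = 0) := by omega
  have c3 : (m / 32 % 2 = 1) ↔ ((255 - m) / 32 % 2 = 0) := by omega
  have c4 : (m / 16 % 2 = 1) ↔ ((255 - m) / 16 % 2 = 0) := by omega
  have c5 : (m / 8 % 2 = 1) ↔ ((255 - m) / 8 % 2 = 0) := by omega
  have c6 : (m / 4 % 2 = 1) ↔ ((255 - m) / 4 % 2 = 0) := by omega
  have c7 : (m / 2 % 2 = 1) ↔ ((255 - m) / 2 % 2 = 0) := by omega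
  have c8 : (m % 2 = 1) ↔ ((255 - m) % 2 = 0) := by omega
  simp only [pvRunM, not_congr c1, not_congr c2, not_congr c3, not_congr c4,
    not_congr c5, not_congr c6, not_congr c7, not_congr c8]

theorem pvSize_le_8 (y : Int) (h0 : 0 ≤ y) (h1 : y < 256) : Nat.size y.toNat ≤ 8 :=
  Nat.size_le.2 (by omega)

-- ===== VERDICT (by name: the statement is the Claim_ definition above) =====
theorem posit16_decode_hw_spec : Claim_equal_posit16_decode_hw := by
  intro p16 _
  unfold Spec_posit16_decode_hw posit16_decode_hw posit16_decode_hw_alt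
  have h0 : 0 ≤ p16 % 65536 := Int.emod_nonneg _ (by norm_num)
  have h1 : p16 % 65536 < 65536 := Int.emod_lt_of_pos _ (by norm_num)
  set p := p16 % 65536 with hp
  by_cases hz : p = 0
  · simp [hz]
  by_cases hn : p = 32768
  · simp [hn]
  simp only [if_neg hz, if_neg hn]
  have hsign : p / 32768 % 2 = p / 32768 := by omega
  rw [hsign]
  have hneg : (65536 - p) % 65536 = 65536 - p := by
    rcases (by omega : p / 32768 = 0 ∨ p / 32768 = 1) with h | h <;> omega
  rw [hneg]
  set mag := if p / 32768 ≠ 0 then 65536 - p else p with hmag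
  have hb0 : 0 ≤ mag % 32768 := Int.emod_nonneg _ (by norm_num)
  have hb1 : mag % 32768 < 32768 := Int.emod_lt_of_pos _ (by norm_num)
  set body := mag % 32768 with hbody
  unfold pvFields
  have hr2 : body / 16384 % 2 = body / 16384 := by omega
  rw [hr2]
  have hm0 : 0 ≤ body / 64 % 256 := Int.emod_nonneg _ (by norm_num)
  have hm1 : body / 64 % 256 < 256 := Int.emod_lt_of_pos _ (by norm_num)
  set m := body / 64 % 256 with hm
  set x := if body / 16384 ≠ 0 then 255 - m else m with hx
  have hx0 : 0 ≤ x := by rw [hx]; split <;> omega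
  have hx1 : x < 256 := by rw [hx]; split <;> omega
  have hrun : pvRun body (body / 16384) [13, 12, 11, 10, 9, 8, 7, 6]
      = 9 - Int.ofNat (Nat.size x.toNat) := by
    rw [pvRun_as_m body _, ← hm, hx]
    rcases (by omega : body / 16384 = 0 ∨ body / 16384 = 1) with h | h
    · rw [h]; simp only [if_neg (by norm_num : ¬ (0:Int) ≠ 0)]
      exact pvRunM_core m hm0 hm1
    · rw [h]; simp only [if_pos (by norm_num : (1:Int) ≠ 0)]
      rw [pvRunM_compl m]
      exact pvRunM_core (255 - m) (by omega) (by omega)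
  rw [hrun]
  set run := 9 - Int.ofNat (Nat.size x.toNat) with hrdef
  rw [show Int.ofNat (Nat.size x.toNat) = (Nat.size x.toNat : Int) from rfl] at hrdef
  have hsz := pvSize_le_8 x hx0 hx1
  have hrlo : 1 ≤ run := by rw [hrdef]; omega
  have hrhi : run ≤ 9 := by rw [hrdef]; omega
  -- k
  have hk : max (-3) (min 3 (if body / 16384 ≠ 0 then run - 1 else -run))
      = (if body / 16384 ≠ 0 then min 3 (run - 1) else -(min 3 run)) := by
    split <;> omega
  rw [hk]
  -- exp_bit: guard true, positions equal
  have hpos : (14 - (run + 1) : Int) = 13 - run := by ring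
  have hguard : (0 ≤ (14 - (run + 1) : Int) ∧ (14 - (run + 1) : Int) ≤ 14) := by omega
  rw [if_pos hguard, hpos]
  -- frac: guard true, drop the redundant % 2048
  have hsh : ((run + 1) + 1 : Int) = run + 2 := by ring
  have hfr0 : 0 ≤ body * 2 ^ ((run + 2).toNat) % 32768 :=
    Int.emod_nonneg _ (by norm_num)
  have hfr1 : body * 2 ^ ((run + 2).toNat) % 32768 < 32768 :=
    Int.emod_lt_of_pos _ (by norm_num)
  have hfrac : body * 2 ^ ((run + 2).toNat) % 32768 / 16 % 2048
      = body * 2 ^ ((run + 2).toNat) % 32768 / 16 := by omega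
  rw [if_pos (by omega : ((run + 1) + 1 : Int) < 15), hsh, hfrac]
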